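-- pv_equiv track=rewrite | github.com/swosu/SwosuCsPythonExamples | Discrete_Structures/Student_Work/ShonH_Disc_Struct_Code/Ch5/Pygame_Building_Collapse.py | create_building
-- ===== SOURCE A (Python) =====
-- def create_building(rows, cols):
--     """Create a tower centered horizontally."""
--     grid = [[0 for _ in range(cols)] for _ in range(rows)]
--     building_width = cols // 3
--     start_col = (cols - building_width) // 2
--     end_col = start_col + building_width
--     for r in range(rows):
--         for c in range(start_col, end_col):
--             grid[r][c] = 1
--     return grid
-- ===== SOURCE B (Python) =====
-- def create_building(rows, cols):
--     """Create a tower centered horizontally."""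
--     if rows <= 0:
--         return []  # no rows: empty grid, no columns to build
--     building_width = cols // 3
--     start_col = (cols - building_width) // 2
--     end_col = start_col + building_width
--     # build the grid column-major: each column is a constant list, ...
--     columns = [([1] * rows if start_col <= c < end_col else [0] * rows)
--                for c in range(cols)]
--     # ... then transpose by indexing to get the row-major grid
--     return [[col[r] for col in columns] for r in range(rows)]
-- ===== Notes on version B (the rewrite author's own statement) =====
-- stated objective: alternative
-- what changed: B constructs the grid column-major (each column a constant all-1s or all-0s list chosen by a band predicate) and then transposes by indexing, instead of A's row-major zero grid mutated by nested loops over the band.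
import Mathlib
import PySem

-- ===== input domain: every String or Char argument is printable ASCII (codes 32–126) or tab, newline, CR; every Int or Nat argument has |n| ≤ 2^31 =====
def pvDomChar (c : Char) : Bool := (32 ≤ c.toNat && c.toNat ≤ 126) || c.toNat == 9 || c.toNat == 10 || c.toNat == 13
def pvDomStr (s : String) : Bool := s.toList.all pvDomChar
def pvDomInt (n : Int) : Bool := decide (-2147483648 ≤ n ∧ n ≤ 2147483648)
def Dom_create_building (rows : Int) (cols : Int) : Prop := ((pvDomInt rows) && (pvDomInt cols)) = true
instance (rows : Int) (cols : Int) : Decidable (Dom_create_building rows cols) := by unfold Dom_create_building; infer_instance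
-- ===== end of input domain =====

-- B builds the grid column-major (constant columns chosen by a band predicate) and
-- transposes by indexing, instead of A's zero grid mutated by nested row-major
-- loops (objective: alternative construction, same cost).

-- ===== PORT A =====
-- inner loop: for c in range(start_col, end_col): grid[r][c] = 1   (c is always a valid non-negative index)
def pvSetOnes (row : List Int) (s e : Int) : List Int :=
  (PySem.List.pyRange s e 1).foldl (fun ro c => ro.set c.toNat ((fun _ => (1 : Int)) (ro.getD c.toNat 0))) row

def create_building (rows : Int) (cols : Int) : List (List Int) :=
  let grid := (PySem.List.pyRange 0 rows 1).map (fun _ => (PySem.List.pyRange 0 cols 1).map (fun _ => (0 : Int)))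
  let building_width := PySem.Int.floordiv cols 3
  let start_col := PySem.Int.floordiv (cols - building_width) 2
  let end_col := start_col + building_width
  (PySem.List.pyRange 0 rows 1).foldl
    (fun g r => g.set r.toNat ((fun row => pvSetOnes row start_col end_col) (g.getD r.toNat []))) grid

-- ===== PORT B =====
-- col[r] is exact as pyGetD: r ∈ range(rows) and every column has length rows, so the index is always valid
def create_building_alt (rows : Int) (cols : Int) : List (List Int) :=
  if rows ≤ 0 then []  -- no rows: empty grid, no columns to build
  else
  let building_width := PySem.Int.floordiv cols 3
  let start_col := PySem.Int.floordiv (cols - building_width) 2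
  let end_col := start_col + building_width
  let columns := (PySem.List.pyRange 0 cols 1).map (fun c =>
    if start_col ≤ c ∧ c < end_col then List.replicate rows.toNat (1 : Int)
    else List.replicate rows.toNat (0 : Int))
  (PySem.List.pyRange 0 rows 1).map (fun r =>
    columns.map (fun col => PySem.List.pyGetD col r 0))

-- ===== PRECONDITION & SPEC =====
def Spec_create_building (rows : Int) (cols : Int) (out : List (List Int)) : Prop := out = create_building_alt rows cols
instance (rows : Int) (cols : Int) (out : List (List Int)) : Decidable (Spec_create_building rows cols out) := by unfold Spec_create_building; infer_instance

-- ===== CLAIM (what is proved, stated in full; the proofs are below) =====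
def Claim_equal_create_building : Prop := ∀ (rows : Int) (cols : Int), Dom_create_building rows cols → Spec_create_building rows cols (create_building rows cols)

-- ===== LEMMAS AND PROOFS =====

-- A fold over range(a,b) that rewrites index i of the list to f of its old value,
-- applied to a prefix pre (of length a) followed by m copies of z, rewrites the
-- next (b-a) cells to f z and leaves the rest at z.
theorem pv_foldl_set {α : Type} (f : α → α) (d : α) :
    ∀ (k : ℕ) (pre : List α) (a b : Int) (m : ℕ) (z : α),
      k = (b - a).toNat → (a : Int) = pre.length → k ≤ m →
      (PySem.List.pyRange a b 1).foldl (fun l i => l.set i.toNat (f (l.getD i.toNat d)))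
          (pre ++ List.replicate m z)
        = pre ++ List.replicate k (f z) ++ List.replicate (m - k) z := by
  intro k
  induction k with
  | zero =>
    intro pre a b m z hk ha hm
    rw [PySem.List.pyRange_one_eq_nil (by omega)]
    simp
  | succ n ih =>
    intro pre a b m z hk ha hm
    rw [PySem.List.pyRange_one_cons (by omega)]
    simp only [List.foldl_cons]
    have ha0 : (0:Int) ≤ a := by rw [ha]; exact_mod_cast Int.natCast_nonneg _
    have haN : a.toNat = pre.length := by omega
    obtain ⟨m', rfl⟩ : ∃ m', m = m' + 1 := ⟨m - 1, by omega⟩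
    have hget : (pre ++ List.replicate (m' + 1) z).getD a.toNat d = z := by
      rw [haN, List.getD_eq_getElem?_getD, List.getElem?_append_right (le_refl _)]
      simp
    have hset : (pre ++ List.replicate (m' + 1) z).set a.toNat (f z)
        = (pre ++ [f z]) ++ List.replicate m' z := by
      rw [haN, List.set_append_right _ _ (le_refl _)]
      simp [List.replicate_succ]
    rw [hget, hset]
    have := ih (pre ++ [f z]) (a + 1) b m' z (by omega)
      (by simp only [List.length_append, List.length_cons, List.length_nil]; push_cast; omega) (by omega)
    rw [this]
    simp [List.replicate_succ, List.append_assoc]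

-- map of a constant over range(0,n) is a replicate
theorem pv_map_const_pyRange {α : Type} (n : Int) (x : α) :
    (PySem.List.pyRange 0 n 1).map (fun _ => x) = List.replicate n.toNat x := by
  rw [PySem.List.pyRange_one]
  simp [Function.comp_def]

-- floor-division brackets
theorem pv_bw_bounds (cols : Int) :
    3 * PySem.Int.floordiv cols 3 ≤ cols ∧ cols < 3 * PySem.Int.floordiv cols 3 + 3 := by
  have h1 := PySem.Int.floordiv_mul_add_mod cols 3
  have h2 := PySem.Int.mod_nonneg cols (b := 3) (by omega)
  have h3 := PySem.Int.mod_lt cols (b := 3) (by omega)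
  omega

theorem pv_sc_bounds (x : Int) :
    2 * PySem.Int.floordiv x 2 ≤ x ∧ x < 2 * PySem.Int.floordiv x 2 + 2 := by
  have h1 := PySem.Int.floordiv_mul_add_mod x 2
  have h2 := PySem.Int.mod_nonneg x (b := 2) (by omega)
  have h3 := PySem.Int.mod_lt x (b := 2) (by omega)
  omega

-- three replicate segments written as one predicate map over range
theorem pv_rep_eq_map (a b c : ℕ) :
    List.replicate a (0 : Int) ++ List.replicate b (1 : Int) ++ List.replicate c (0 : Int)
      = (List.range (a + b + c)).map (fun i => if a ≤ i ∧ i < a + b then (1 : Int) else 0) := by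
  apply List.ext_getElem
  · simp; omega
  · intro i h1 h2
    simp only [List.getElem_map, List.getElem_range]
    simp only [List.length_append, List.length_replicate] at h1
    rcases lt_or_ge i a with hia | hia
    · rw [List.getElem_append_left (by simp [List.length_append]; omega),
        List.getElem_append_left (by simpa using hia), List.getElem_replicate]
      simp; omega
    · rcases lt_or_ge i (a + b) with hib | hib
      · rw [List.getElem_append_left (by simp; omega),
          List.getElem_append_right (by simpa using hia), List.getElem_replicate]
        simp [hia, hib]
      · rw [List.getElem_append_right (by simp; omega), List.getElem_replicate]
        simp; omega

-- A's band row (mutation of the zero row) equals the three-segment replicate form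
theorem pv_row_eq (cols : Int) :
    pvSetOnes ((PySem.List.pyRange 0 cols 1).map (fun _ => (0 : Int)))
        (PySem.Int.floordiv (cols - PySem.Int.floordiv cols 3) 2)
        (PySem.Int.floordiv (cols - PySem.Int.floordiv cols 3) 2 + PySem.Int.floordiv cols 3)
      = List.replicate (PySem.Int.floordiv (cols - PySem.Int.floordiv cols 3) 2).toNat (0 : Int)
        ++ List.replicate (PySem.Int.floordiv cols 3).toNat (1 : Int)
        ++ List.replicate (cols - (PySem.Int.floordiv (cols - PySem.Int.floordiv cols 3) 2 + PySem.Int.floordiv cols 3)).toNat (0 : Int) := by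
  set bw := PySem.Int.floordiv cols 3 with hbw
  set sc := PySem.Int.floordiv (cols - bw) 2 with hsc
  have hb := pv_bw_bounds cols
  have hs := pv_sc_bounds (cols - bw)
  rw [pv_map_const_pyRange]
  by_cases hc : 0 ≤ cols ∧ 0 < bw
  · obtain ⟨hc0, hbw0⟩ := hc
    have hsc0 : 0 ≤ sc := by omega
    have hec : sc + bw ≤ cols := by omega
    have hsplit : List.replicate cols.toNat (0 : Int)
        = List.replicate sc.toNat (0 : Int) ++ List.replicate (cols.toNat - sc.toNat) (0 : Int) := by
      rw [← List.replicate_add]; congr 1; omega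
    rw [hsplit]
    unfold pvSetOnes
    rw [pv_foldl_set (fun _ => (1 : Int)) 0 bw.toNat (List.replicate sc.toNat (0 : Int)) sc (sc + bw)
      (cols.toNat - sc.toNat) 0 (by omega) (by simp; omega) (by omega)]
    congr 2
    omega
  · rw [not_and_or, not_le, not_lt] at hc
    have hbw0 : bw ≤ 0 := by omega
    have hrange : PySem.List.pyRange sc (sc + bw) 1 = [] :=
      PySem.List.pyRange_one_eq_nil (by omega)
    unfold pvSetOnes
    rw [hrange]
    simp only [List.foldl_nil]
    have h1 : bw.toNat = 0 := by omega
    have h2 : cols.toNat = sc.toNat + (cols - (sc + bw)).toNat := by omega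
    rw [h1, h2, List.replicate_add]
    simp

-- B's transposed row: indexing the constant columns at a valid r gives the predicate map,
-- which equals the three-segment replicate form
theorem pv_alt_row_eq (rows cols r : Int) (hr0 : 0 ≤ r) (hr : r < rows) :
    ((PySem.List.pyRange 0 cols 1).map (fun c =>
        if PySem.Int.floordiv (cols - PySem.Int.floordiv cols 3) 2 ≤ c ∧
           c < PySem.Int.floordiv (cols - PySem.Int.floordiv cols 3) 2 + PySem.Int.floordiv cols 3
        then List.replicate rows.toNat (1 : Int) else List.replicate rows.toNat (0 : Int))).map
      (fun col => PySem.List.pyGetD col r 0)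
      = List.replicate (PySem.Int.floordiv (cols - PySem.Int.floordiv cols 3) 2).toNat (0 : Int)
        ++ List.replicate (PySem.Int.floordiv cols 3).toNat (1 : Int)
        ++ List.replicate (cols - (PySem.Int.floordiv (cols - PySem.Int.floordiv cols 3) 2 + PySem.Int.floordiv cols 3)).toNat (0 : Int) := by
  set bw := PySem.Int.floordiv cols 3 with hbw
  set sc := PySem.Int.floordiv (cols - bw) 2 with hsc
  have hb := pv_bw_bounds cols
  have hs := pv_sc_bounds (cols - bw)
  have hrep : ∀ x : Int, PySem.List.pyGetD (List.replicate rows.toNat x) r 0 = x := by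
    intro x
    rw [PySem.List.pyGetD_of_nonneg _ _ hr0]
    rw [List.getD_eq_getElem?_getD, List.getElem?_replicate]
    simp only [if_pos (by omega : r.toNat < rows.toNat)]
    rfl
  rw [List.map_map, pv_rep_eq_map, PySem.List.pyRange_one]
  have hlen : (cols - 0).toNat = sc.toNat + bw.toNat + (cols - (sc + bw)).toNat := by omega
  rw [hlen, List.map_map]
  apply List.map_congr_left
  intro i hi
  rw [List.mem_range] at hi
  simp only [Function.comp_apply, zero_add]
  rcases lt_or_ge ((i : Int)) sc with h | h
  · rw [if_neg (by omega), hrep, if_neg (by omega)]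
  · rcases lt_or_ge ((i : Int)) (sc + bw) with h2 | h2
    · have hscn : 0 ≤ sc := by omega
      rw [if_pos ⟨h, h2⟩, hrep, if_pos (by omega)]
    · rw [if_neg (by omega), hrep, if_neg (by omega)]

-- ===== VERDICT (by name: the statement is the Claim_ definition above) =====
theorem create_building_spec : Claim_equal_create_building := by
  intro rows cols _
  unfold Spec_create_building create_building create_building_alt
  simp only []
  by_cases hrows : rows ≤ 0
  · have h0 : rows.toNat = 0 := by omega
    rw [if_pos hrows, PySem.List.pyRange_one_eq_nil (show rows ≤ (0:Int) by omega)]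
    simp [h0]
  rw [if_neg hrows]
  rw [pv_map_const_pyRange]
  have h := pv_foldl_set (fun row => pvSetOnes row
      (PySem.Int.floordiv (cols - PySem.Int.floordiv cols 3) 2)
      (PySem.Int.floordiv (cols - PySem.Int.floordiv cols 3) 2 + PySem.Int.floordiv cols 3)) []
    rows.toNat ([] : List (List Int)) 0 rows rows.toNat
    ((PySem.List.pyRange 0 cols 1).map (fun _ => (0 : Int)))
    (by omega) (by simp) (le_refl _)
  simp only [List.nil_append] at h
  rw [h, pv_row_eq]
  rw [List.map_congr_left (fun r hr => pv_alt_row_eq rows cols r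
    (by have := PySem.List.mem_pyRange_one.mp hr; omega)
    (by have := PySem.List.mem_pyRange_one.mp hr; omega))]
  rw [pv_map_const_pyRange]
  simp
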